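-- pv_equiv track=rewrite | github.com/timkimber/jira_exporter | lib/subissues.py | _extract_panel_title
-- ===== SOURCE A (Python) =====
-- def _extract_panel_title(params):
--     if not params:
--         return ""
--     parts = [part.strip() for part in params.split("|") if part.strip()]
--     for part in parts:
--         if part.startswith("title="):
--             return part[len("title=") :].strip()
--     return ""
-- ===== SOURCE B (Python) =====
-- def _extract_panel_title(params):
--     if not params:
--         return ""
--     table = {}
--     for part in params.split("|"):
--         s = part.strip()
--         eq = s.find("=")
--         if eq != -1:
--             k = s[:eq]
--             if k not in table:
--                 table[k] = s[eq + 1:]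
--     return table.get("title", "").strip()
-- ===== Notes on version B (the rewrite author's own statement) =====
-- stated objective: alternative
-- what changed: Instead of filtering/stripping parts and scanning them for a 'title=' prefix, B indexes every part once into a first-occurrence dict keyed by the text before the first '=' and reads the 'title' entry at the end.
import Mathlib
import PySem

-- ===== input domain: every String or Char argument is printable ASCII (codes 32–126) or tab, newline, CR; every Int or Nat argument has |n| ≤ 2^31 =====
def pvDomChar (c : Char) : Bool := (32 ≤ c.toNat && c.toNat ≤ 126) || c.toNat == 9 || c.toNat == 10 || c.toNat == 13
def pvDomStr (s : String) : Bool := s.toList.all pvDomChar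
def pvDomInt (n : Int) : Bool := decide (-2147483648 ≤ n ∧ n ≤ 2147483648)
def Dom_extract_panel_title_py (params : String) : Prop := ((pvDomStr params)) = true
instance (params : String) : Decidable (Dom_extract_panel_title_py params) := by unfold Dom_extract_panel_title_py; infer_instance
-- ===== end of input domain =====

-- B replaces A's filter-then-scan for a 'title=' prefix with a one-pass first-occurrence
-- dict keyed by the text before the first '='; same cost, different structure (alternative).

-- ===== PORT A =====
-- the `for part in parts: if part.startswith("title="): return …` loop
def pvLoopA : List String → String
  | [] => ""
  | p :: rest =>
      if PySem.Str.startswith p "title=" then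
        PySem.Str.strip (PySem.Str.slice p (some 6) none)
      else pvLoopA rest

def extract_panel_title_py (params : String) : String :=
  if params = "" then ""
  else
    let parts := (((PySem.Str.split? params "|").getD []).map PySem.Str.strip).filter
      (fun p => p ≠ "")
    pvLoopA parts

-- ===== PORT B =====
-- one iteration of B's loop: record s[:eq] ↦ s[eq+1:] on first occurrence
def pvStepB (d : PySem.Dict String String) (part : String) : PySem.Dict String String :=
  let s := PySem.Str.strip part
  let eq := PySem.Str.find s "="
  if eq ≠ -1 then
    let k := PySem.Str.slice s none (some eq)
    if (d.get? k).isNone then d.insert k (PySem.Str.slice s (some (eq + 1)) none) else d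
  else d

def extract_panel_title_py_alt (params : String) : String :=
  if params = "" then ""
  else
    let table := ((PySem.Str.split? params "|").getD []).foldl pvStepB PySem.Dict.empty
    PySem.Str.strip (table.getD "title" "")

-- ===== PRECONDITION & SPEC =====
def Spec_extract_panel_title_py (params : String) (out : String) : Prop := out = extract_panel_title_py_alt params
instance (params : String) (out : String) : Decidable (Spec_extract_panel_title_py params out) := by unfold Spec_extract_panel_title_py; infer_instance

-- ===== CLAIM (what is proved, stated in full; the proofs are below) =====
def Claim_equal_extract_panel_title_py : Prop := ∀ (params : String), Dom_extract_panel_title_py params → Spec_extract_panel_title_py params (extract_panel_title_py params)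

-- ===== LEMMAS AND PROOFS =====

-- a singleton prefix is just "the first element is that character"
lemma pv_singleton_prefix {c : Char} {l : List Char} : [c] <+: l ↔ l.head? = some c := by
  cases l with
  | nil => simp
  | cons a t =>
      constructor
      · rintro ⟨u, hu⟩; simp at hu; simp [hu.1]
      · intro h; simp at h; exact ⟨t, by simp [h]⟩

-- if "title=" is a prefix, the first '=' is at index 5
lemma pv_find_eq_five {cs : List Char} (h : "title=".toList <+: cs) :
    PySem.Chars.find cs ['='] = 5 := by
  have htl : "title=".toList = ['t','i','t','l','e','='] := rfl
  obtain ⟨r, hr⟩ := h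
  rw [htl] at hr
  subst hr
  have hin : ['='] <:+: (['t','i','t','l','e','='] ++ r) :=
    ⟨['t','i','t','l','e'], r, by simp⟩
  have h0 : 0 ≤ PySem.Chars.find (['t','i','t','l','e','='] ++ r) ['='] :=
    (PySem.Chars.find_nonneg_iff _ _).mpr hin
  obtain ⟨hpre, hmin⟩ := PySem.Chars.find_spec h0
  set n := (PySem.Chars.find (['t','i','t','l','e','='] ++ r) ['=']).toNat with hn
  have h5 : ['='] <+: List.drop 5 (['t','i','t','l','e','='] ++ r) := by
    simp
  have hle : n ≤ 5 := by
    by_contra hgt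
    exact hmin 5 (by omega) h5
  have hne : n = 5 := by
    interval_cases n <;> first
      | rfl
      | (rw [pv_singleton_prefix] at hpre; simp at hpre)
  omega

-- conversely: first '=' at position e with the text before it "title" forces the prefix
lemma pv_title_prefix {cs : List Char} (h0 : 0 ≤ PySem.Chars.find cs ['='])
    (hk : cs.take (PySem.Chars.find cs ['=']).toNat = "title".toList) :
    "title=".toList <+: cs := by
  obtain ⟨hpre, _⟩ := PySem.Chars.find_spec h0
  set n := (PySem.Chars.find cs ['=']).toNat with hn
  have hlen : (cs.take n).length = 5 := by rw [hk]; rfl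
  have hmin : min n cs.length = 5 := by simpa using hlen
  have hdropne : List.drop n cs ≠ [] := by
    intro hnil
    rw [pv_singleton_prefix, hnil] at hpre
    simp at hpre
  have hlt : n < cs.length := by
    by_contra hge
    exact hdropne (List.drop_eq_nil_of_le (by omega))
  have hn5 : n = 5 := by omega
  rw [pv_singleton_prefix] at hpre
  have hcons : List.drop n cs = '=' :: (List.drop n cs).tail := by
    cases hd : List.drop n cs with
    | nil => exact absurd hd hdropne
    | cons a t => rw [hd] at hpre; simp at hpre; simp [hpre]
  refine ⟨(List.drop n cs).tail, ?_⟩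
  have : cs = cs.take n ++ List.drop n cs := (List.take_append_drop n cs).symm
  rw [this, hk, hcons, hn5]
  rfl

-- one step of B, read at key "title"
lemma pv_step_title (d : PySem.Dict String String) (p : String) :
    (d.get? "title" = none →
      (PySem.Str.startswith (PySem.Str.strip p) "title=" = true →
        (pvStepB d p).get? "title" =
          some (PySem.Str.slice (PySem.Str.strip p) (some 6) none)) ∧
      (PySem.Str.startswith (PySem.Str.strip p) "title=" = false →
        (pvStepB d p).get? "title" = none)) ∧
    (∀ v, d.get? "title" = some v → (pvStepB d p).get? "title" = some v) := by
  have hfind : PySem.Str.find (PySem.Str.strip p) "=" =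
      PySem.Chars.find (PySem.Str.strip p).toList ['='] := by
    rw [PySem.Str.find_eq]; rfl
  have hsw : PySem.Str.startswith (PySem.Str.strip p) "title=" = true ↔
      "title=".toList <+: (PySem.Str.strip p).toList := by
    rw [PySem.Str.startswith_eq]; exact PySem.Chars.startswith_iff _ _
  by_cases hpre : "title=".toList <+: (PySem.Str.strip p).toList
  · -- the 'title=' case: find = 5, key = "title"
    have h5 : PySem.Str.find (PySem.Str.strip p) "=" = 5 := by
      rw [hfind]; exact pv_find_eq_five hpre
    have hkey : PySem.Str.slice (PySem.Str.strip p) none (some 5) = "title" := by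
      apply String.toList_inj.mp
      rw [PySem.Str.toList_slice, PySem.Chars.slice_eq_listSlice,
        PySem.List.slice_to _ (by omega : (0:Int) ≤ 5)]
      obtain ⟨r, hr⟩ := hpre
      rw [← hr]
      rfl
    have hswt : PySem.Str.startswith (PySem.Str.strip p) "title=" = true := hsw.mpr hpre
    constructor
    · intro hnone
      refine ⟨fun _ => ?_, fun hf => absurd hswt (by rw [hf]; simp)⟩
      simp only [pvStepB, h5, hkey]
      rw [if_pos (by omega : (5:Int) ≠ -1)]
      rw [if_pos (by rw [hnone]; rfl)]
      rw [PySem.Dict.get?_insert_self]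
      norm_num
    · intro v hv
      simp only [pvStepB, h5, hkey]
      rw [if_pos (by omega : (5:Int) ≠ -1)]
      rw [if_neg (by rw [hv]; simp)]
      exact hv
  · -- no 'title=' prefix: the step never touches key "title"
    have huntouched : (pvStepB d p).get? "title" = d.get? "title" := by
      simp only [pvStepB]
      by_cases hneg : PySem.Str.find (PySem.Str.strip p) "=" = -1
      · rw [if_neg (not_not_intro hneg)]
      · rw [if_pos hneg]
        have h0 : (0:Int) ≤ PySem.Chars.find (PySem.Str.strip p).toList ['='] := by
          have := PySem.Chars.neg_one_le_find (PySem.Str.strip p).toList ['=']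
          rw [hfind] at hneg
          omega
        have hk : ("title" : String) ≠
            PySem.Str.slice (PySem.Str.strip p) none (some (PySem.Str.find (PySem.Str.strip p) "=")) := by
          intro hEq
          apply hpre
          apply pv_title_prefix h0
          have := congrArg String.toList hEq
          rw [PySem.Str.toList_slice, PySem.Chars.slice_eq_listSlice, hfind,
            PySem.List.slice_to _ h0] at this
          exact this.symm
        split
        · exact PySem.Dict.get?_insert_of_ne d _ hk
        · rfl
    have hswf : PySem.Str.startswith (PySem.Str.strip p) "title=" = false := by
      cases hb : PySem.Str.startswith (PySem.Str.strip p) "title=" with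
      | false => rfl
      | true => exact absurd (hsw.mp hb) hpre
    refine ⟨fun hnone => ⟨fun ht => absurd ht (by rw [hswf]; simp), fun _ => ?_⟩,
           fun v hv => ?_⟩
    · rw [huntouched, hnone]
    · rw [huntouched, hv]

-- the loop invariant relating B's fold to A's scan
lemma pv_main (l : List String) (d : PySem.Dict String String) :
    (d.get? "title" = none →
      PySem.Str.strip ((l.foldl pvStepB d).getD "title" "") =
        pvLoopA ((l.map PySem.Str.strip).filter (fun p => p ≠ ""))) ∧
    (∀ v, d.get? "title" = some v → (l.foldl pvStepB d).get? "title" = some v) := by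
  induction l generalizing d with
  | nil =>
      refine ⟨fun hnone => ?_, fun v hv => hv⟩
      simp [PySem.Dict.getD, hnone, pvLoopA]
      decide
  | cons p rest ih =>
      obtain ⟨hstep_none, hstep_some⟩ := pv_step_title d p
      constructor
      · intro hnone
        obtain ⟨ht, hf⟩ := hstep_none hnone
        cases hb : PySem.Str.startswith (PySem.Str.strip p) "title=" with
        | true =>
            have hVal := ht hb
            have hfold := (ih (pvStepB d p)).2 _ hVal
            have hnotempty : PySem.Str.strip p ≠ "" := by
              intro hemp
              rw [hemp] at hb
              exact absurd hb (by decide)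
            simp only [List.foldl_cons, List.map_cons, List.filter_cons]
            have hb' : PySem.Chars.startswith (PySem.Chars.strip p.toList)
                ['t','i','t','l','e','='] = true := by simpa using hb
            rw [PySem.Dict.getD, hfold]
            simp [hnotempty, pvLoopA, hb']
        | false =>
            have hN := hf hb
            have hfold := (ih (pvStepB d p)).1 hN
            simp only [List.foldl_cons, List.map_cons, List.filter_cons]
            by_cases hemp : PySem.Str.strip p = ""
            · simp [hemp, hfold]
            · have hb' : PySem.Chars.startswith (PySem.Chars.strip p.toList)
                  ['t','i','t','l','e','='] = false := by simpa using hb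
              simp [hemp, pvLoopA, hb', hfold]
      · intro v hv
        simp only [List.foldl_cons]
        exact (ih (pvStepB d p)).2 _ (hstep_some v hv)

-- ===== VERDICT (by name: the statement is the Claim_ definition above) =====
theorem extract_panel_title_py_spec : Claim_equal_extract_panel_title_py := by
  intro params _
  unfold Spec_extract_panel_title_py extract_panel_title_py extract_panel_title_py_alt
  by_cases h : params = ""
  · simp [h]
  · simp only [h, if_false]
    exact ((pv_main ((PySem.Str.split? params "|").getD []) PySem.Dict.empty).1
      (by simp [pysem])).symm
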